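-- pv_equiv track=rewrite | github.com/Computer-Engineering-Classes/Introduction-Data-Science | Other stuff/list2.py | sum67
-- ===== SOURCE A (Python) =====
-- def sum67(nums: list[int]) -> int:
--     #nums = nums.copy()
--     if len(nums) == 0: return 0
--     flag = False
--     while not flag:
--         try:
--             i = nums.index(6)
--             j = nums.index(7, i)
--             del nums[i:j + 1]
--         except ValueError: flag = True
--     return sum(nums)
-- ===== SOURCE B (Python) =====
-- def sum67(nums: list[int]) -> int:
--     # Single linear pass (alternative algorithm; A instead repeatedly deletes slices).
--     # While "skipping" (after an unmatched 6), values are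
--     # accumulated in `pending`; a 7 discards them, end-of-list restores them
--     # (matching A, which keeps a section whose 6 has no following 7).
--     total = 0
--     pending = 0
--     skipping = False
--     for x in nums:
--         if skipping:
--             if x == 7:
--                 skipping = False
--                 pending = 0
--             else:
--                 pending += x
--         else:
--             if x == 6:
--                 skipping = True
--                 pending = 6
--             else:
--                 total += x
--     return total + (pending if skipping else 0)
-- ===== Notes on version B (the rewrite author's own statement) =====
-- stated objective: alternative
-- what changed: Replaced the repeated index/index/del-slice rounds (each rescanning and rebuilding the list) with one linear pass keeping a skip flag and a pending buffer that is restored when a 6 has no matching 7.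
import Mathlib
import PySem

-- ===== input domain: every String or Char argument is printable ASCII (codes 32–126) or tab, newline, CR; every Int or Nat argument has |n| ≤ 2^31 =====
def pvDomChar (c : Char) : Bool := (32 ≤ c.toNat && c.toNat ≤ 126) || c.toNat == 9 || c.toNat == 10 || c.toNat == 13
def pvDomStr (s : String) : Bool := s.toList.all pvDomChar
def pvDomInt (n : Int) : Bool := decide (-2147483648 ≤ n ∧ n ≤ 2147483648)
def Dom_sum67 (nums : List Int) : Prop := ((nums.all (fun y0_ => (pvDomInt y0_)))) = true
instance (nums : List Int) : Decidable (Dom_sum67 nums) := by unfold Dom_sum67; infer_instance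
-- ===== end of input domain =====

-- B: one linear pass with a skip flag and a pending buffer instead of A's repeated
-- index/index/del-slice rounds (alternative single-pass algorithm). A mutates its argument
-- in place (del nums[i:j+1]); B does not — the equivalence proved is about the return value.

-- ===== PORT A =====
-- the while loop: each round finds the first 6, the first 7 from there, and deletes
-- the slice nums[i:j+1] (= take i ++ drop (j+1), j = i + k); ValueError (index? = none) stops.
def sum67Loop (nums : List Int) : List Int :=
  match h6 : PySem.List.index? nums 6 with
  | none => nums
  | some i =>
    match PySem.List.index? (nums.drop i) 7 with
    | none => nums
    | some k => sum67Loop (nums.take i ++ nums.drop (i + k + 1))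
termination_by nums.length
decreasing_by
  obtain ⟨hi, _, _⟩ := PySem.List.getElem_of_index?_eq_some h6
  simp only [List.length_append, List.length_take, List.length_drop]
  omega

def sum67 (nums : List Int) : Int :=
  if nums.length = 0 then 0 else (sum67Loop nums).sum

-- ===== PORT B =====
-- state: (total, skipping, pending); at end the pending section is restored if still skipping
def sum67AltLoop (l : List Int) (total : Int) (skipping : Bool) (pending : Int) : Int :=
  match l with
  | [] => if skipping then total + pending else total
  | x :: xs =>
    if skipping then
      if x = 7 then sum67AltLoop xs total false 0
      else sum67AltLoop xs total true (pending + x)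
    else
      if x = 6 then sum67AltLoop xs total true 6
      else sum67AltLoop xs (total + x) false 0

def sum67_alt (nums : List Int) : Int := sum67AltLoop nums 0 false 0

-- ===== PRECONDITION & SPEC =====
def Spec_sum67 (nums : List Int) (out : Int) : Prop := out = sum67_alt nums
instance (nums : List Int) (out : Int) : Decidable (Spec_sum67 nums out) := by unfold Spec_sum67; infer_instance

-- ===== CLAIM (what is proved, stated in full; the proofs are below) =====
def Claim_equal_sum67 : Prop := ∀ (nums : List Int), Dom_sum67 nums → Spec_sum67 nums (sum67 nums)

-- ===== LEMMAS AND PROOFS =====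

-- non-skip mode over a 6-free prefix just accumulates the sum
lemma altLoop_no6 (pre rest : List Int) (s : Int) (h : (6:Int) ∉ pre) :
    sum67AltLoop (pre ++ rest) s false 0 = sum67AltLoop rest (s + pre.sum) false 0 := by
  induction pre generalizing s with
  | nil => simp [sum67AltLoop]
  | cons x xs ih =>
    have hx : x ≠ 6 := fun hx => h (by simp [hx])
    simp only [List.cons_append, sum67AltLoop, if_neg hx, Bool.false_eq_true, if_false]
    rw [ih _ (fun hm => h (List.mem_cons_of_mem _ hm))]
    congr 1
    simp only [List.sum_cons]
    ring

-- skip mode over a 7-free segment accumulates into pending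
lemma altLoop_no7 (mid rest : List Int) (s p : Int) (h : (7:Int) ∉ mid) :
    sum67AltLoop (mid ++ rest) s true p = sum67AltLoop rest s true (p + mid.sum) := by
  induction mid generalizing p with
  | nil => simp [sum67AltLoop]
  | cons x xs ih =>
    have hx : x ≠ 7 := fun hx => h (by simp [hx])
    simp only [List.cons_append, sum67AltLoop, if_neg hx, if_true]
    rw [ih _ (fun hm => h (List.mem_cons_of_mem _ hm))]
    congr 1
    simp only [List.sum_cons]
    ring

-- non-skip mode with no 6 left: the result is s + sum
lemma altLoop_final_no6 (l : List Int) (s : Int) (h : (6:Int) ∉ l) :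
    sum67AltLoop l s false 0 = s + l.sum := by
  have := altLoop_no6 l [] s h
  simp only [List.append_nil] at this
  simp [this, sum67AltLoop]

-- skip mode with no 7 left: pending is restored at the end
lemma altLoop_final_no7 (l : List Int) (s p : Int) (h : (7:Int) ∉ l) :
    sum67AltLoop l s true p = s + p + l.sum := by
  have := altLoop_no7 l [] s p h
  simp only [List.append_nil] at this
  simp [this, sum67AltLoop]; ring

-- unfolding equations for sum67Loop's dependent match
lemma sum67Loop_none (nums : List Int) (h6 : PySem.List.index? nums 6 = none) :
    sum67Loop nums = nums := by
  rw [sum67Loop.eq_def]; split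
  · rfl
  · next i h => rw [h6] at h; cases h

lemma sum67Loop_no7 (nums : List Int) (i : Nat) (h6 : PySem.List.index? nums 6 = some i)
    (h7 : PySem.List.index? (nums.drop i) 7 = none) : sum67Loop nums = nums := by
  rw [sum67Loop.eq_def]; split
  · rfl
  · next i' h => rw [h6] at h; injection h with h; subst h; rw [h7]

lemma sum67Loop_step (nums : List Int) (i k : Nat) (h6 : PySem.List.index? nums 6 = some i)
    (h7 : PySem.List.index? (nums.drop i) 7 = some k) :
    sum67Loop nums = sum67Loop (nums.take i ++ nums.drop (i + k + 1)) := by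
  rw [sum67Loop.eq_def]; split
  · next h => rw [h6] at h; cases h
  · next i' h => rw [h6] at h; injection h with h; subst h; rw [h7]

-- main invariant: B's pass computes the sum of A's reduced list
lemma altLoop_eq_sum_loop (nums : List Int) :
    sum67AltLoop nums 0 false 0 = (sum67Loop nums).sum := by
  induction nums using sum67Loop.induct with
  | case1 nums h6 =>
    rw [sum67Loop_none nums h6]
    rw [altLoop_final_no6 nums 0 (by rwa [← PySem.List.index?_eq_none_iff])]
    ring
  | case2 nums i h6 h7 =>
    rw [sum67Loop_no7 nums i h6 h7]
    obtain ⟨pre, suf, hsplit, hlen, hpre⟩ := (PySem.List.index?_eq_some_iff _ _ _).mp h6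
    subst hsplit
    have hdrop : (pre ++ 6 :: suf).drop i = 6 :: suf := by
      rw [← hlen, List.drop_left]
    rw [hdrop] at h7
    have h7suf : (7:Int) ∉ suf := by
      have := (PySem.List.index?_eq_none_iff _ _).mp h7
      intro hm; exact this (List.mem_cons_of_mem _ hm)
    rw [altLoop_no6 pre (6 :: suf) 0 hpre]
    simp only [sum67AltLoop, Bool.false_eq_true, if_false]
    rw [altLoop_final_no7 suf _ 6 h7suf]
    simp [List.sum_append]; ring
  | case3 nums i h6 k h7 ih =>
    rw [sum67Loop_step nums i k h6 h7, ← ih]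
    obtain ⟨pre, suf, hsplit, hlen, hpre⟩ := (PySem.List.index?_eq_some_iff _ _ _).mp h6
    subst hsplit
    have hdrop : (pre ++ 6 :: suf).drop i = 6 :: suf := by
      rw [← hlen, List.drop_left]
    rw [hdrop] at h7
    -- 6 ≠ 7, so the 7 is found in suf at position k - 1
    have h67 : ((6:Int) :: suf) ≠ [] := by simp
    have hk : ∃ k', k = k' + 1 ∧ PySem.List.index? suf 7 = some k' := by
      rw [PySem.List.index?_cons_of_ne suf (show (6:Int) ≠ 7 by norm_num)] at h7
      cases hs : PySem.List.index? suf 7 with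
      | none => rw [hs] at h7; simp at h7
      | some k' => rw [hs] at h7; simp at h7; exact ⟨k', h7.symm, rfl⟩
    obtain ⟨k', hk1, hk2⟩ := hk
    obtain ⟨mid, rest, hsuf, hmidlen, hmid⟩ := (PySem.List.index?_eq_some_iff _ _ _).mp hk2
    subst hsuf hk1
    have htake : (pre ++ 6 :: (mid ++ 7 :: rest)).take i = pre := by
      rw [← hlen, List.take_left]
    have hdrop2 : (pre ++ 6 :: (mid ++ 7 :: rest)).drop (i + (k' + 1) + 1) = rest := by
      have : i + (k' + 1) + 1 = pre.length + ((6 :: mid).length + 1) := by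
        simp [← hlen, ← hmidlen]; omega
      rw [this, List.drop_length_add_append]
      simp
    rw [htake, hdrop2]
    rw [altLoop_no6 pre _ 0 hpre, altLoop_no6 pre _ 0 hpre]
    simp only [sum67AltLoop, Bool.false_eq_true, if_false]
    rw [altLoop_no7 mid (7 :: rest) _ 6 hmid]
    simp [sum67AltLoop]

-- ===== VERDICT (by name: the statement is the Claim_ definition above) =====
theorem sum67_spec : Claim_equal_sum67 := by
  intro nums _
  unfold Spec_sum67 sum67 sum67_alt
  split
  · next h =>
    have : nums = [] := List.length_eq_zero_iff.mp h
    subst this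
    rw [altLoop_eq_sum_loop, sum67Loop]
    simp
  · exact (altLoop_eq_sum_loop nums).symm
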